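-- pv_equiv track=rewrite | github.com/ladarat/GitCreate | diamond.py | print_diamond
-- ===== SOURCE A (Python) =====
-- def print_diamond(character):
--     if character == 'A':
--         return 'A'
--
--     start_char = ord('A')
--     i = start_char
--     target_char = ord(character)
--     line = ''
--     front_space = ' '*(target_char - i)
--     middle_space = 1
--
--     while i <= target_char:
--         if i == start_char:
--             line += ' '*(target_char - i) + chr(i) + '\n'
--         else:
--             line += ' '*(target_char - i) + chr(i) + ' '*(middle_space) + chr(i) + '\n'
--             middle_space += 2
--         i += 1
--
--     i = target_char - 1
--     middle_space -= 4
--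
--     while i >= start_char:
--         if i == start_char:
--             line += ' '*(target_char - i) + chr(i)
--         else:
--             line += ' '*(target_char - i) + chr(i) + ' '*(middle_space) + chr(i) + '\n'
--             middle_space -= 2
--         i -= 1
--
--
--
--     return line
-- ===== SOURCE B (Python) =====
-- def print_diamond(character):
--     n = ord(character) - ord('A')
--     rows = []
--     for r in range(2 * n + 1):
--         k = n - abs(n - r)
--         rows.append(''.join(chr(ord('A') + k) if c in (n - k, n + k) else ' '
--                             for c in range(n + k + 1)))
--     return '\n'.join(rows)
-- ===== Notes on version B (the rewrite author's own statement) =====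
-- stated objective: alternative
-- what changed: B treats the diamond as a 2D grid: for every row r of range(2n+1) it derives the letter index k = n - |n - r| and emits each column cell of the row from a closed-form per-cell rule (letter at columns n-k and n+k, space elsewhere), replacing A's two counter-driven while loops that concatenate precomputed space runs with a running middle_space accumulator.
import Mathlib
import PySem

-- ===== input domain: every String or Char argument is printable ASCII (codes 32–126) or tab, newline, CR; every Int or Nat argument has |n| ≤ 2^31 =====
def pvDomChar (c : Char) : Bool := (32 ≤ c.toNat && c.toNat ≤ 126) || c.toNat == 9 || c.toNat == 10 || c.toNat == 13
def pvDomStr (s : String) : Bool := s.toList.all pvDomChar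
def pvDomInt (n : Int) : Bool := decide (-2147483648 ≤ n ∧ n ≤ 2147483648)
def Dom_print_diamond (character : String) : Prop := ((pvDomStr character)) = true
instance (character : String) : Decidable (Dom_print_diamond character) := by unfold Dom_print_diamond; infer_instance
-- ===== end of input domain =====

-- B computes the diamond as a 2D grid from a closed-form per-cell rule (row r has letter
-- index k = n - |n - r|, letters at columns n-k and n+k), instead of A's two counter-driven
-- while loops; objective: alternative.
-- Both ports compute over List Char (Lean's String.append is kernel-opaque) and wrap once at the end.

-- shared primitive helpers (exact): ' '*n (empty for n ≤ 0) and chr(i) on the admitted domain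
def pdSpaces (n : Int) : List Char := List.replicate n.toNat ' '
def pdChr (i : Int) : Char := Char.ofNat i.toNat

-- ===== PORT A =====
-- first while loop of A: i climbs from start to target, accumulating line and middle_space;
-- fuel only makes the recursion structural (it equals the number of remaining iterations at each call)
def pdUp (start target : Int) (fuel : Nat) (i : Int) (line : List Char) (mid : Int) : List Char × Int :=
  match fuel with
  | 0 => (line, mid)
  | f + 1 =>
    if i ≤ target then
      if i = start then
        pdUp start target f (i + 1) (line ++ pdSpaces (target - i) ++ [pdChr i] ++ ['\n']) mid
      else
        pdUp start target f (i + 1)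
          (line ++ pdSpaces (target - i) ++ [pdChr i] ++ pdSpaces mid ++ [pdChr i] ++ ['\n'])
          (mid + 2)
    else (line, mid)

-- second while loop of A: i descends from target-1 to start
def pdDown (start target : Int) (fuel : Nat) (i : Int) (line : List Char) (mid : Int) : List Char :=
  match fuel with
  | 0 => line
  | f + 1 =>
    if start ≤ i then
      if i = start then
        pdDown start target f (i - 1) (line ++ pdSpaces (target - i) ++ [pdChr i]) mid
      else
        pdDown start target f (i - 1)
          (line ++ pdSpaces (target - i) ++ [pdChr i] ++ pdSpaces mid ++ [pdChr i] ++ ['\n'])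
          (mid - 2)
    else line

-- the body of A on the character list (the character == 'A' test, then the two while loops)
def pdA (cs : List Char) : List Char :=
  if cs = ['A'] then ['A']
  else
    let start : Int := 65
    -- ord(character): exact for the single-character strings admitted by Pre_
    let target : Int := ((cs.headD 'A').toNat : Int)
    let p := pdUp start target (target - start + 1).toNat start [] 1
    pdDown start target (target - start).toNat (target - 1) p.1 (p.2 - 4)

def print_diamond (character : String) : String :=
  String.ofList (pdA character.toList)

-- ===== PORT B =====
-- one grid row of Source B: ''.join(chr(65+k) if c in (n-k, n+k) else ' ' for c in range(n+k+1))
def pdGridRow (n k : Int) : List Char :=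
  (List.range (n + k + 1).toNat).map
    (fun (c : Nat) => if (c : Int) = n - k ∨ (c : Int) = n + k then pdChr (65 + k) else ' ')

def pdB (cs : List Char) : List Char :=
  let n : Int := ((cs.headD 'A').toNat : Int) - 65
  -- rows: for r in range(2n+1), letter index k = n - abs(n - r), row from the per-cell rule
  let rows : List (List Char) :=
    (List.range (2 * n + 1).toNat).map (fun (r : Nat) => pdGridRow n (n - |n - (r : Int)|))
  PySem.Chars.join ['\n'] rows

def print_diamond_alt (character : String) : String :=
  String.ofList (pdB character.toList)

-- ===== PRECONDITION & SPEC =====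
-- Pre_: Python's ord raises TypeError unless the argument is a single character, in both A and B.
def Pre_print_diamond (character : String) : Prop := character.toList.length = 1
instance (character : String) : Decidable (Pre_print_diamond character) := by
  unfold Pre_print_diamond; infer_instance

def pvWitness_print_diamond : String := "E"

def Spec_print_diamond (character : String) (out : String) : Prop := out = print_diamond_alt character
instance (character : String) (out : String) : Decidable (Spec_print_diamond character out) := by
  unfold Spec_print_diamond; infer_instance

-- ===== CLAIM (what is proved, stated in full; the proofs are below) =====
def Claim_equal_print_diamond : Prop :=
  ∀ (character : String), Dom_print_diamond character → Pre_print_diamond character →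
    Spec_print_diamond character (print_diamond character)

-- ===== LEMMAS AND PROOFS =====

-- one row of the diamond in A's concatenation shape (k counted from 'A')
def pdRow (n k : Nat) : List Char :=
  pdSpaces ((n : Int) - (k : Int)) ++ [pdChr (65 + (k : Int))] ++
    (if 0 < k then pdSpaces (2 * (k : Int) - 1) ++ [pdChr (65 + (k : Int))] else [])

lemma pdRow_pos (n k : Nat) (hk : 1 ≤ k) :
    pdRow n k = pdSpaces ((n : Int) - k) ++ [pdChr (65 + (k : Int))] ++
      pdSpaces (2 * (k : Int) - 1) ++ [pdChr (65 + (k : Int))] := by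
  simp [pdRow, Nat.lt_of_lt_of_le Nat.zero_lt_one hk, List.append_assoc]

lemma pd_join_concat (ys : List (List Char)) (last : List Char) :
    PySem.Chars.join ['\n'] (ys ++ [last]) = (ys.map (· ++ ['\n'])).flatten ++ last := by
  induction ys with
  | nil => simp [PySem.Chars.join_singleton]
  | cons y ys ih =>
    cases ys with
    | nil => simp [PySem.Chars.join_cons_cons, PySem.Chars.join_singleton]
    | cons z zs =>
      simp only [List.cons_append] at *
      rw [PySem.Chars.join_cons_cons, ih]
      simp [List.append_assoc]

-- invariant of A's first loop, for i = 65+k with k ≥ 1 (entry middle_space is 2k-1)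
lemma pd_up_inv (n : Nat) : ∀ (f k : Nat), f = n + 1 - k → 1 ≤ k → k ≤ n + 1 → ∀ (line : List Char),
    pdUp 65 (65 + (n : Int)) f (65 + (k : Int)) line (2 * (k : Int) - 1) =
      (line ++ ((List.range' k f).map (fun j => pdRow n j ++ ['\n'])).flatten, 2 * ((n : Int) + 1) - 1) := by
  intro f
  induction f with
  | zero =>
    intro k hf hk1 hk2 line
    have : k = n + 1 := by omega
    subst this
    simp [pdUp]
  | succ f ih =>
    intro k hf hk1 hk2 line
    have hkn : k ≤ n := by omega
    rw [pdUp]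
    rw [if_pos (by omega), if_neg (by intro h; omega)]
    have harg : (65 : Int) + (k : Int) + 1 = 65 + ((k + 1 : Nat) : Int) := by push_cast; ring
    have hmid : 2 * (k : Int) - 1 + 2 = 2 * ((k + 1 : Nat) : Int) - 1 := by push_cast; ring
    rw [harg, hmid, ih (k + 1) (by omega) (by omega) (by omega)]
    have hsp : (65 : Int) + (n : Int) - (65 + (k : Int)) = (n : Int) - (k : Int) := by ring
    rw [hsp, List.range'_succ]
    simp [pdRow_pos n k hk1, List.append_assoc]

-- invariant of A's second loop, for i = 65+k (fuel k+1; middle_space is 2k-1 whenever k ≥ 1)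
lemma pd_down_inv (n : Nat) : ∀ (k : Nat) (line : List Char) (mid : Int), (1 ≤ k → mid = 2 * (k : Int) - 1) →
    pdDown 65 (65 + (n : Int)) (k + 1) (65 + (k : Int)) line mid =
      line ++ (((List.range' 1 k).reverse).map (fun j => pdRow n j ++ ['\n'])).flatten ++ pdRow n 0 := by
  intro k
  induction k with
  | zero =>
    intro line mid hmid
    rw [pdDown]
    rw [if_pos (by simp), if_pos (by simp)]
    rw [pdDown]
    have hsp : (65 : Int) + (n : Int) - (65 + ((0 : Nat) : Int)) = (n : Int) - ((0 : Nat) : Int) := by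
      push_cast; ring
    rw [hsp]
    simp [pdRow, List.append_assoc]
  | succ k ih =>
    intro line mid hmid
    rw [hmid (by omega)]
    rw [pdDown]
    rw [if_pos (by push_cast; omega), if_neg (by intro h; push_cast at h; omega)]
    have harg : (65 : Int) + ((k + 1 : Nat) : Int) - 1 = 65 + ((k : Nat) : Int) := by push_cast; ring
    rw [harg, ih _ _ (by intro _; push_cast; ring)]
    have hsp : (65 : Int) + (n : Int) - (65 + ((k + 1 : Nat) : Int)) = (n : Int) - ((k + 1 : Nat) : Int) := by
      push_cast; ring
    rw [hsp, List.range'_concat]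
    have h1k : 1 + 1 * k = k + 1 := by omega
    rw [h1k]
    simp [pdRow_pos n (k + 1) (by omega), List.append_assoc]

-- the canonical form: upper rows, then mirrored inner rows, then the bottom row
def pdCanon (n : Nat) : List Char :=
  (pdRow n 0 ++ ['\n']) ++ ((List.range' 1 n).map (fun j => pdRow n j ++ ['\n'])).flatten ++
    (((List.range' 1 (n - 1)).map (fun j => pdRow n j ++ ['\n'])).reverse).flatten ++ pdRow n 0

lemma pdA_big (c : Char) (n : Nat) (h1 : 1 ≤ n) (hc : c.toNat = 65 + n) (hne : c ≠ 'A') :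
    pdA [c] = pdCanon n := by
  have hlist : ([c] : List Char) ≠ ['A'] := by simpa using hne
  unfold pdA
  rw [if_neg hlist]
  simp only [List.headD_cons, hc]
  have htgt : ((65 + n : Nat) : Int) = 65 + (n : Int) := by push_cast; ring
  rw [htgt]
  have ef1 : ((65 : Int) + (n : Int) - 65 + 1).toNat = n + 1 := by omega
  have ef2 : ((65 : Int) + (n : Int) - 65).toNat = n := by omega
  rw [ef1, ef2]
  rw [pdUp]
  rw [if_pos (by omega), if_pos rfl]
  have hline0 : ([] : List Char) ++ pdSpaces (65 + (n : Int) - 65) ++ [pdChr 65] ++ ['\n'] =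
      pdRow n 0 ++ ['\n'] := by
    simp [pdRow, pdSpaces, pdChr]
  rw [hline0]
  have hup := pd_up_inv n n 1 (by omega) (by omega) (by omega) (pdRow n 0 ++ ['\n'])
  have e1 : (65 : Int) + ((1 : Nat) : Int) = 65 + 1 := by norm_num
  have e2 : 2 * ((1 : Nat) : Int) - 1 = 1 := by norm_num
  rw [e1, e2] at hup
  rw [hup]
  dsimp only
  obtain ⟨m, rfl⟩ : ∃ m, n = m + 1 := ⟨n - 1, by omega⟩
  have hi : (65 : Int) + ((m + 1 : Nat) : Int) - 1 = 65 + ((m : Nat) : Int) := by push_cast; ring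
  have hm : 2 * (((m + 1 : Nat) : Int) + 1) - 1 - 4 = 2 * ((m : Nat) : Int) - 1 := by push_cast; ring
  rw [hi, hm]
  rw [pd_down_inv (m + 1) m _ _ (by intro _; rfl)]
  unfold pdCanon
  have hm1 : (m + 1 - 1 : Nat) = m := by omega
  rw [hm1]
  simp [List.append_assoc, List.map_reverse]

-- B's grid row equals A's concatenation-shaped row, for letter index k ≤ n
lemma pdGridRow_eq (n k : Nat) (hk : k ≤ n) :
    pdGridRow ((n : Int)) ((k : Int)) = pdRow n k := by
  unfold pdGridRow pdRow
  have hcnt : ((n : Int) + (k : Int) + 1).toNat = n + k + 1 := by omega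
  rw [hcnt]
  have hsp1 : pdSpaces ((n : Int) - (k : Int)) = List.replicate (n - k) ' ' := by
    unfold pdSpaces; congr 1; omega
  rcases Nat.eq_zero_or_pos k with hk0 | hkpos
  · subst hk0
    rw [List.range_succ, List.map_append, List.map_singleton]
    have h1 : (List.range n).map
        (fun c : Nat => if (c : Int) = (n : Int) - ((0:Nat) : Int) ∨ (c : Int) = (n : Int) + ((0:Nat) : Int) then pdChr (65 + ((0:Nat) : Int)) else ' ')
        = List.replicate n ' ' := by
      rw [List.eq_replicate_iff]
      refine ⟨by simp, ?_⟩
      intro b hb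
      simp only [List.mem_map, List.mem_range] at hb
      obtain ⟨c, hc, rfl⟩ := hb
      rw [if_neg]
      push_cast
      omega
    rw [h1, hsp1]
    have hcell : (if ((n : Nat) : Int) = (n : Int) - ((0:Nat) : Int) ∨ ((n : Nat) : Int) = (n : Int) + ((0:Nat) : Int) then pdChr (65 + ((0:Nat) : Int)) else ' ') = pdChr 65 := by
      rw [if_pos (by omega)]
      norm_num
    rw [hcell]
    simp
  · have hsplit : List.range (n + k + 1) =
        List.range' 0 (n - k) ++ [n - k] ++ List.range' (n - k + 1) (2 * k - 1) ++ [n + k] := by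
      rw [List.range_eq_range']
      have h1 : List.range' 0 (n + k + 1) = List.range' 0 (n + k) ++ [n + k] := by
        rw [List.range'_concat]; simp
      rw [h1]
      congr 1
      have h2 : List.range' 0 (n + k) = List.range' 0 (n - k + 1) ++ List.range' (0 + 1 * (n - k + 1)) (2 * k - 1) := by
        rw [List.range'_append]
        congr 1
        omega
      have h3 : (0 + 1 * (n - k + 1) : Nat) = n - k + 1 := by omega
      rw [h2, h3, List.range'_concat]
      simp [List.append_assoc]
    rw [hsplit]
    simp only [List.map_append, List.map_singleton]
    have hA : (List.range' 0 (n - k)).map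
        (fun c : Nat => if (c : Int) = (n : Int) - (k : Int) ∨ (c : Int) = (n : Int) + (k : Int) then pdChr (65 + (k : Int)) else ' ')
        = List.replicate (n - k) ' ' := by
      rw [List.eq_replicate_iff]
      refine ⟨by simp, ?_⟩
      intro b hb
      simp only [List.mem_map, List.mem_range'_1] at hb
      obtain ⟨c, hc, rfl⟩ := hb
      have hno : ¬((c : Int) = (n : Int) - (k : Int) ∨ (c : Int) = (n : Int) + (k : Int)) := by
        omega
      rw [if_neg hno]
    have hM : (List.range' (n - k + 1) (2 * k - 1)).map
        (fun c : Nat => if (c : Int) = (n : Int) - (k : Int) ∨ (c : Int) = (n : Int) + (k : Int) then pdChr (65 + (k : Int)) else ' ')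
        = List.replicate (2 * k - 1) ' ' := by
      rw [List.eq_replicate_iff]
      refine ⟨by simp, ?_⟩
      intro b hb
      simp only [List.mem_map, List.mem_range'_1] at hb
      obtain ⟨c, hc, rfl⟩ := hb
      rw [if_neg]
      omega
    rw [hA, hM]
    rw [if_pos (show (((n - k : Nat)) : Int) = (n : Int) - (k : Int) ∨ (((n - k : Nat)) : Int) = (n : Int) + (k : Int) by left; omega)]
    rw [if_pos (show (((n + k : Nat)) : Int) = (n : Int) - (k : Int) ∨ (((n + k : Nat)) : Int) = (n : Int) + (k : Int) by right; omega)]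
    rw [if_pos hkpos, hsp1]
    have hsp2 : pdSpaces (2 * (k : Int) - 1) = List.replicate (2 * k - 1) ' ' := by
      unfold pdSpaces; congr 1; omega
    rw [hsp2]
    simp [List.append_assoc]

-- B's row list (for n ≥ 1) splits into top half, mirrored inner rows, and the bottom row
lemma pdB_big (c : Char) (n : Nat) (h1 : 1 ≤ n) (hc : c.toNat = 65 + n) :
    pdB [c] = pdCanon n := by
  unfold pdB
  simp only [List.headD_cons, hc]
  have hn : ((65 + n : Nat) : Int) - 65 = (n : Int) := by push_cast; ring
  rw [hn]
  have hcnt : (2 * (n : Int) + 1).toNat = 2 * n + 1 := by omega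
  rw [hcnt]
  -- each ported row is pdRow n (letter index)
  have hrow : ∀ r : Nat, r < 2 * n + 1 →
      pdGridRow ((n : Int)) ((n : Int) - |(n : Int) - (r : Int)|) = pdRow n (n - (n - r) - (r - n)) := by
    intro r hr
    have hk : (n : Int) - |(n : Int) - (r : Int)| = ((n - (n - r) - (r - n) : Nat) : Int) := by
      rcases Nat.lt_or_ge r (n + 1) with h | h
      · rw [abs_of_nonneg (by omega)]; omega
      · rw [abs_of_neg (by omega)]; omega
    rw [hk, pdGridRow_eq n _ (by omega)]
  rw [List.map_congr_left (fun r hr => hrow r (List.mem_range.mp hr))]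
  -- split off the last row (r = 2n, letter index 0)
  have hrs : List.range (2 * n + 1) = List.range (2 * n) ++ [2 * n] := List.range_succ
  rw [hrs, List.map_append, List.map_singleton]
  have hk2n : (n - (n - 2 * n) - (2 * n - n) : Nat) = 0 := by omega
  rw [hk2n, pd_join_concat]
  -- split the remaining 2n rows into the top n+1 and the inner descending n-1
  have hsplit : List.range (2 * n) = List.range' 0 (n + 1) ++ List.range' (0 + 1 * (n + 1)) (n - 1) := by
    rw [List.range_eq_range', List.range'_append]
    congr 1
    omega
  have hst : (0 + 1 * (n + 1) : Nat) = n + 1 := by omega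
  rw [hst] at hsplit
  rw [hsplit, List.map_append, List.map_append, List.flatten_append]
  -- top half: r ≤ n gives letter index r
  have htop : (List.range' 0 (n + 1)).map (fun r => pdRow n (n - (n - r) - (r - n))) =
      pdRow n 0 :: (List.range' 1 n).map (pdRow n) := by
    have h0 : List.range' 0 (n + 1) = 0 :: List.range' 1 n := by
      rw [List.range'_succ]
    rw [h0, List.map_cons]
    congr 1
    · congr 1; omega
    · apply List.map_congr_left
      intro r hr
      simp only [List.mem_range'] at hr
      congr 1
      omega
    -- bottom inner half: r = n+1+j gives letter index n-1-j, the reverse of range' 1 (n-1)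
  have hbot : (List.range' (n + 1) (n - 1)).map (fun r => pdRow n (n - (n - r) - (r - n))) =
      ((List.range' 1 (n - 1)).map (pdRow n)).reverse := by
    rw [← List.map_reverse, List.reverse_range', List.map_map,
      List.range'_eq_map_range, List.map_map]
    apply List.map_congr_left
    intro j hj
    simp only [List.mem_range] at hj
    simp only [Function.comp_def]
    congr 1
    omega
  rw [htop, hbot]
  unfold pdCanon
  simp [List.append_assoc, List.map_reverse, List.map_map, Function.comp_def]

lemma pd_main (c : Char) : pdA [c] = pdB [c] := by
  by_cases hA : c = 'A'
  · subst hA; decide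
  · rcases Nat.lt_or_ge c.toNat 65 with hlt | hge
    · -- target below 'A': A's loops run zero iterations and B's row range is empty
      have hlist : ([c] : List Char) ≠ ['A'] := by simpa using hA
      unfold pdA pdB
      rw [if_neg hlist]
      simp only [List.headD_cons]
      have ef1 : ((c.toNat : Int) - 65 + 1).toNat = 0 := by omega
      have ef2 : ((c.toNat : Int) - 65).toNat = 0 := by omega
      have ef3 : (2 * ((c.toNat : Int) - 65) + 1).toNat = 0 := by omega
      rw [ef1, ef2, ef3]
      simp [pdUp, pdDown, PySem.Chars.join_nil]
    · rcases Nat.eq_or_lt_of_le hge with heq | hgt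
      · exact absurd (by
          have : c = Char.ofNat c.toNat := (Char.ofNat_toNat c).symm
          rw [this, ← heq]) hA
      · obtain ⟨n, hn, hc⟩ : ∃ n, 1 ≤ n ∧ c.toNat = 65 + n := ⟨c.toNat - 65, by omega, by omega⟩
        rw [pdA_big c n hn hc hA, pdB_big c n hn hc]

-- ===== VERDICT =====
theorem print_diamond_spec : Claim_equal_print_diamond := by
  intro character hDom hPre
  unfold Spec_print_diamond print_diamond print_diamond_alt
  obtain ⟨c, hc⟩ : ∃ c, character.toList = [c] := by
    cases h : character.toList with
    | nil => simp [Pre_print_diamond, h] at hPre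
    | cons a t =>
      cases t with
      | nil => exact ⟨a, rfl⟩
      | cons b t' => simp [Pre_print_diamond, h] at hPre
  rw [hc, pd_main]
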